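-- pv_equiv track=rewrite | github.com/matuspintek-boop/ib111 | 06/p2_b_happy.py | is_b_happy
-- ===== SOURCE A (Python) =====
-- def square_sum(number_array: list[int]) -> int:
--     output: int = 0
--     for i in number_array:
--         output += i**2
--     return output
--
-- def convert_into_base(number: int, base: int) -> list[int]:
--     output: list[int] = []
--
--     while number > 0:
--         output.append(number % base)
--         number //= base
--
--     return output
--
-- def is_b_happy(number: int, base: int) -> bool:
--     current: list[int] = convert_into_base(number, base)
--
--     already_seen: list[list[int]] = []
--
--     while current not in already_seen:
--         already_seen.append(current)
--         sum_: int = square_sum(current)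
--         current = convert_into_base(sum_, base)
--
--     return current == [1]
-- ===== SOURCE B (Python) =====
-- # Alternative algorithm: Floyd's tortoise-and-hare cycle detection on the
-- # integer-valued squared-digit-sum sequence, instead of A's growing list of
-- # previously seen digit lists with membership scans (O(1) memory vs O(k) lists).
-- def is_b_happy(number: int, base: int) -> bool:
--     def f(n: int) -> int:
--         s = 0
--         while n > 0:
--             s += (n % base) ** 2
--             n //= base
--         return s
--
--     slow = f(number)
--     fast = f(f(number))
--     while slow != fast:
--         slow = f(slow)
--         fast = f(f(fast))
--     return slow == 1
-- ===== Notes on version B (the rewrite author's own statement) =====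
-- stated objective: faster
-- what changed: B detects the cycle of the squared-digit-sum sequence with Floyd's tortoise-and-hare on plain integers (constant memory, no stored history) instead of A's growing list of previously seen digit lists searched linearly each iteration.
-- outside the precondition, e.g. on is_b_happy(5, -2): A returns False, B returns True
import Mathlib
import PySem

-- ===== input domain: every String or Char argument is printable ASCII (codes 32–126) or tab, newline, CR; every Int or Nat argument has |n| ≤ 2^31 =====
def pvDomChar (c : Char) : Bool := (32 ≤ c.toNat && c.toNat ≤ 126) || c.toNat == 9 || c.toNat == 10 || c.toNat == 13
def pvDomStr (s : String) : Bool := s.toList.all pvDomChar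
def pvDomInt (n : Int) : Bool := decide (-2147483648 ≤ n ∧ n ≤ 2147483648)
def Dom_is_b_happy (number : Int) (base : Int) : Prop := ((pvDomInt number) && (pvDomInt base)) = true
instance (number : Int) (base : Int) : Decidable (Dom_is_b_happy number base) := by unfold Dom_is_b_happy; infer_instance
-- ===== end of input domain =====

-- B replaces A's list-of-seen-digit-lists cycle detection by Floyd's
-- tortoise-and-hare on the integer squared-digit-sum sequence (constant
-- memory, no stored history); return values agree on Pre_.

-- fuel for the unbounded Python while loops (never exhausted on Pre_/Dom inputs)
def pvFuel : Nat := 2 ^ 70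

-- ===== PORT A =====
def square_sum (number_array : List Int) : Int :=
  number_array.foldl (fun output i => output + i ^ 2) 0

def convertLoop : Nat → Int → Int → List Int → List Int
  | 0, _, _, output => output
  | fuel + 1, number, base, output =>
    if 0 < number then
      convertLoop fuel (PySem.Int.floordiv number base) base (output ++ [PySem.Int.mod number base])
    else output

def convert_into_base (number : Int) (base : Int) : List Int :=
  convertLoop pvFuel number base []

def happyLoopA : Nat → Int → List (List Int) → List Int → List Int
  | 0, _, _, current => current
  | fuel + 1, base, already_seen, current =>
    if current ∈ already_seen then current
    else happyLoopA fuel base (already_seen ++ [current])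
          (convert_into_base (square_sum current) base)

def is_b_happy (number : Int) (base : Int) : Bool :=
  decide (happyLoopA pvFuel base [] (convert_into_base number base) = [1])

-- ===== PORT B =====
-- inner helper f: "s = 0; while n > 0: s += (n % base)**2; n //= base; return s"
def digitSqSum : Nat → Int → Int → Int → Int
  | 0, _, _, s => s
  | fuel + 1, n, base, s =>
    if 0 < n then
      digitSqSum fuel (PySem.Int.floordiv n base) base (s + PySem.Int.mod n base ^ 2)
    else s

def fB (n : Int) (base : Int) : Int := digitSqSum pvFuel n base 0

-- "while slow != fast: slow = f(slow); fast = f(f(fast))"; returns final slow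
def floydLoop : Nat → Int → Int → Int → Int
  | 0, _, slow, _ => slow
  | fuel + 1, base, slow, fast =>
    if slow = fast then slow
    else floydLoop fuel base (fB slow base) (fB (fB fast base) base)

def is_b_happy_alt (number : Int) (base : Int) : Bool :=
  decide (floydLoop pvFuel base (fB number base) (fB (fB number base) base) = 1)

-- ===== PRECONDITION & SPEC =====
-- Pre_ excludes number > 0 with base < 2: there A diverges (base 1), raises
-- ZeroDivisionError (base 0), or — for negative bases — returns a value built
-- from a degenerate one-digit negative representation, a corner no caller of a
-- happy-number test would specify either way.
def Pre_is_b_happy (number : Int) (base : Int) : Prop := 2 ≤ base ∨ number ≤ 0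
instance (number : Int) (base : Int) : Decidable (Pre_is_b_happy number base) := by
  unfold Pre_is_b_happy; infer_instance

def pvWitness_is_b_happy : Int × Int := (7, 2)

def Spec_is_b_happy (number : Int) (base : Int) (out : Bool) : Prop := out = is_b_happy_alt number base
instance (number : Int) (base : Int) (out : Bool) : Decidable (Spec_is_b_happy number base out) := by unfold Spec_is_b_happy; infer_instance

-- ===== CLAIM (what is proved, stated in full; the proofs are below) =====
def Claim_equal_is_b_happy : Prop := ∀ (number : Int) (base : Int), Dom_is_b_happy number base → Pre_is_b_happy number base → Spec_is_b_happy number base (is_b_happy number base)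

-- ===== LEMMAS AND PROOFS =====

-- a seen-set formulation of A's loop over plain ints, stepping stone of the proof
def pvSeenLoop : Nat → Int → PySem.Set Int → Int → Int
  | 0, _, _, n => n
  | fuel + 1, base, seen, n =>
    if n ∈ seen then n
    else pvSeenLoop fuel base (PySem.Set.add seen n) (fB n base)

-- the invariant carried by the lockstep simulation of A's loop and pvSeenLoop
def pvInv (base n : Int) : Prop := 0 ≤ n ∧ n < 2 ^ 70 ∧ (2 ≤ base ∨ n = 0)

theorem convertLoop_nonpos (fuel : Nat) (n b : Int) (acc : List Int) (h : n ≤ 0) :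
    convertLoop fuel n b acc = acc := by
  cases fuel with
  | zero => rfl
  | succ f => simp [convertLoop, not_lt.mpr h]

theorem convertLoop_acc (fuel : Nat) : ∀ (n b : Int) (acc : List Int),
    convertLoop fuel n b acc = acc ++ convertLoop fuel n b [] := by
  induction fuel with
  | zero => intro n b acc; simp [convertLoop]
  | succ f ih =>
    intro n b acc
    by_cases h : 0 < n
    · simp only [convertLoop, if_pos h, List.nil_append]
      rw [ih _ _ (acc ++ [PySem.Int.mod n b]), ih _ _ [PySem.Int.mod n b]]
      simp
    · simp [convertLoop, h]

theorem square_sum_shift (xs : List Int) : ∀ a : Int,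
    xs.foldl (fun output i => output + i ^ 2) a = a + square_sum xs := by
  induction xs with
  | nil => intro a; simp [square_sum]
  | cons x xs ih =>
    intro a
    simp only [square_sum, List.foldl] at *
    rw [ih (a + x ^ 2), ih (0 + x ^ 2)]
    ring

theorem square_sum_cons (x : Int) (xs : List Int) :
    square_sum (x :: xs) = x ^ 2 + square_sum xs := by
  simp only [square_sum, List.foldl]
  rw [square_sum_shift xs (0 + x ^ 2)]
  simp only [square_sum]
  ring

-- B's inline digit loop computes the square-sum of A's digit list
theorem digitSqSum_eq (fuel : Nat) : ∀ (n b s : Int),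
    digitSqSum fuel n b s = s + square_sum (convertLoop fuel n b []) := by
  induction fuel with
  | zero => intro n b s; simp [digitSqSum, convertLoop, square_sum]
  | succ f ih =>
    intro n b s
    by_cases h : 0 < n
    · simp only [digitSqSum, convertLoop, if_pos h, List.nil_append]
      rw [ih, convertLoop_acc f (PySem.Int.floordiv n b) b [PySem.Int.mod n b]]
      simp only [List.singleton_append, square_sum_cons]
      ring
    · simp [digitSqSum, convertLoop, h, square_sum]

theorem digitSqSum_nonpos (fuel : Nat) (n b s : Int) (h : n ≤ 0) :
    digitSqSum fuel n b s = s := by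
  cases fuel with
  | zero => rfl
  | succ f => simp [digitSqSum, not_lt.mpr h]

theorem digitSqSum_nonneg (fuel : Nat) : ∀ (n b s : Int), 0 ≤ s → 0 ≤ digitSqSum fuel n b s := by
  induction fuel with
  | zero => intro n b s hs; simpa [digitSqSum]
  | succ f ih =>
    intro n b s hs
    by_cases h : 0 < n
    · simp only [digitSqSum, if_pos h]
      exact ih _ _ _ (by positivity)
    · simpa [digitSqSum, h]

theorem digitSqSum_bound (fuel : Nat) : ∀ (k : Nat) (n b s : Int), 2 ≤ b → 0 ≤ n →
    n < 2 ^ k → digitSqSum fuel n b s ≤ s + k * (b - 1) ^ 2 := by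
  induction fuel with
  | zero =>
    intro k n b s hb _ _
    have : (0:Int) ≤ k * (b - 1) ^ 2 := by positivity
    simp [digitSqSum]; linarith
  | succ f ih =>
    intro k n b s hb hn hk
    by_cases h : 0 < n
    · have hk0 : k ≠ 0 := by
        rintro rfl; simp at hk; omega
      obtain ⟨j, rfl⟩ := Nat.exists_eq_succ_of_ne_zero hk0
      have hb0 : (0:Int) < b := by omega
      have hq0 : 0 ≤ PySem.Int.floordiv n b := by
        rw [PySem.Int.floordiv_eq_ediv_of_pos hb0]
        exact Int.ediv_nonneg hn (le_of_lt hb0)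
      have hqlt : PySem.Int.floordiv n b < 2 ^ j := by
        rw [PySem.Int.floordiv_lt_iff_lt_mul hb0]
        calc (n:Int) < 2 ^ (j+1) := hk
          _ = 2 ^ j * 2 := by ring
          _ ≤ 2 ^ j * b := by
              have : (0:Int) ≤ 2 ^ j := by positivity
              nlinarith
      have hmod : 0 ≤ PySem.Int.mod n b ∧ PySem.Int.mod n b < b := by
        rw [PySem.Int.mod_eq_emod_of_pos hb0]
        exact ⟨Int.emod_nonneg n (by omega), Int.emod_lt_of_pos n hb0⟩
      have hsq : PySem.Int.mod n b ^ 2 ≤ (b - 1) ^ 2 := by nlinarith [hmod.1, hmod.2]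
      simp only [digitSqSum, if_pos h]
      have := ih j (PySem.Int.floordiv n b) b (s + PySem.Int.mod n b ^ 2) hb hq0 hqlt
      push_cast at this ⊢
      nlinarith
    · have : (0:Int) ≤ k * (b - 1) ^ 2 := by positivity
      simp [digitSqSum, h]; linarith

-- value of a digit list in base b
def pvVal (b : Int) : List Int → Int
  | [] => 0
  | d :: ds => d + b * pvVal b ds

theorem pvVal_convertLoop (fuel : Nat) : ∀ (k : Nat) (n b : Int), 2 ≤ b → 0 ≤ n →
    n < 2 ^ k → k ≤ fuel → pvVal b (convertLoop fuel n b []) = n := by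
  induction fuel with
  | zero =>
    intro k n b _ hn hk hkf
    interval_cases k
    simp [convertLoop, pvVal]; omega
  | succ f ih =>
    intro k n b hb hn hk hkf
    by_cases h : 0 < n
    · have hk0 : k ≠ 0 := by rintro rfl; simp at hk; omega
      obtain ⟨j, rfl⟩ := Nat.exists_eq_succ_of_ne_zero hk0
      have hb0 : (0:Int) < b := by omega
      have hq0 : 0 ≤ PySem.Int.floordiv n b := by
        rw [PySem.Int.floordiv_eq_ediv_of_pos hb0]
        exact Int.ediv_nonneg hn (le_of_lt hb0)
      have hqlt : PySem.Int.floordiv n b < 2 ^ j := by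
        rw [PySem.Int.floordiv_lt_iff_lt_mul hb0]
        calc (n:Int) < 2 ^ (j+1) := hk
          _ = 2 ^ j * 2 := by ring
          _ ≤ 2 ^ j * b := by
              have : (0:Int) ≤ 2 ^ j := by positivity
              nlinarith
      simp only [convertLoop, if_pos h, List.nil_append]
      rw [convertLoop_acc f]
      have : pvVal b (PySem.Int.mod n b :: convertLoop f (PySem.Int.floordiv n b) b []) =
          PySem.Int.mod n b + b * pvVal b (convertLoop f (PySem.Int.floordiv n b) b []) := rfl
      simp only [List.singleton_append, this, ih j _ b hb hq0 hqlt (by omega)]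
      have := PySem.Int.floordiv_mul_add_mod n b
      linarith
    · have hn0 : n = 0 := by omega
      subst hn0
      simp [convertLoop, pvVal]

theorem seventy_le_fuel : 70 ≤ pvFuel := by norm_num [pvFuel]

theorem conv_inj {b m n : Int} (hm : pvInv b m) (hn : pvInv b n)
    (h : convert_into_base m b = convert_into_base n b) : m = n := by
  by_cases hb : 2 ≤ b
  · have h1 := pvVal_convertLoop pvFuel 70 m b hb hm.1 hm.2.1 seventy_le_fuel
    have h2 := pvVal_convertLoop pvFuel 70 n b hb hn.1 hn.2.1 seventy_le_fuel
    unfold convert_into_base at h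
    rw [← h1, ← h2, h]
  · have := hm.2.2.resolve_left hb
    have := hn.2.2.resolve_left hb
    omega

theorem conv_one {b : Int} (hb : 2 ≤ b) : convert_into_base 1 b = [1] := by
  have hF : pvFuel = (pvFuel - 1) + 1 := by norm_num [pvFuel]
  have hb0 : (0:Int) < b := by omega
  unfold convert_into_base
  rw [hF]
  simp only [convertLoop, if_pos (show (0:Int) < 1 by norm_num), List.nil_append]
  rw [PySem.Int.floordiv_eq_ediv_of_pos hb0, PySem.Int.mod_eq_emod_of_pos hb0,
    Int.ediv_eq_zero_of_lt (by norm_num) (by omega),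
    Int.emod_eq_of_lt (by norm_num) (by omega),
    convertLoop_nonpos _ _ _ _ (le_refl 0)]

theorem conv_eq_one_iff {b n : Int} (hn : pvInv b n) :
    (convert_into_base n b = [1] ↔ n = 1) := by
  constructor
  · intro h
    by_cases hb : 2 ≤ b
    · exact conv_inj hn ⟨by norm_num, by norm_num, Or.inl hb⟩ (h.trans (conv_one hb).symm)
    · have hn0 := hn.2.2.resolve_left hb
      subst hn0
      rw [convert_into_base, convertLoop_nonpos _ _ _ _ (le_refl 0)] at h
      simp at h
  · rintro rfl
    rcases hn.2.2 with hb | hb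
    · exact conv_one hb
    · exact absurd hb one_ne_zero

theorem pvInv_step {b n : Int} (hb31 : b ≤ 2 ^ 31) (hn : pvInv b n) :
    pvInv b (fB n b) := by
  by_cases hb : 2 ≤ b
  · refine ⟨digitSqSum_nonneg _ _ _ _ (le_refl 0), ?_, Or.inl hb⟩
    simp only [fB]
    have hbd := digitSqSum_bound pvFuel 70 n b 0 hb hn.1 hn.2.1
    have h1 : (b - 1) ^ 2 ≤ (2 ^ 31 - 1) ^ 2 := by nlinarith
    have : (70:Int) * (2 ^ 31 - 1) ^ 2 < 2 ^ 70 := by norm_num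
    push_cast at hbd
    nlinarith
  · have hn0 := hn.2.2.resolve_left hb
    subst hn0
    rw [fB, digitSqSum_nonpos _ _ _ _ (le_refl 0)]
    exact ⟨le_refl 0, by norm_num, Or.inr rfl⟩

theorem lockstep (b : Int) (hb31 : b ≤ 2 ^ 31) : ∀ (fuel : Nat) (seen : List Int) (n : Int),
    pvInv b n → (∀ m ∈ seen, pvInv b m) →
    decide (happyLoopA fuel b (seen.map (fun m => convert_into_base m b)) (convert_into_base n b) = [1])
      = decide (pvSeenLoop fuel b seen n = 1) := by
  intro fuel
  induction fuel with
  | zero =>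
    intro seen n hn _
    simp only [happyLoopA, pvSeenLoop, decide_eq_decide]
    exact conv_eq_one_iff hn
  | succ f ih =>
    intro seen n hn hseen
    have hmem : (convert_into_base n b ∈ seen.map (fun m => convert_into_base m b)) ↔ n ∈ seen := by
      constructor
      · intro h
        obtain ⟨m, hm, hconv⟩ := List.mem_map.mp h
        rwa [conv_inj (hseen m hm) hn hconv] at hm
      · intro h
        exact List.mem_map.mpr ⟨n, h, rfl⟩
    simp only [happyLoopA, pvSeenLoop]
    by_cases h : n ∈ seen
    · simp only [if_pos (hmem.mpr h), if_pos h, decide_eq_decide]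
      exact conv_eq_one_iff hn
    · simp only [if_neg (fun hc => h (hmem.mp hc)), if_neg h]
      have hadd : PySem.Set.add seen n = seen ++ [n] := by
        have hc : PySem.Set.contains seen n = false := by
          simp only [PySem.Set.contains, List.contains_eq_mem, decide_eq_false_iff_not]
          exact h
        rw [PySem.Set.add, hc]
        simp
      have hcur : convert_into_base (square_sum (convert_into_base n b)) b
          = convert_into_base (fB n b) b := by
        rw [fB, digitSqSum_eq, zero_add]
        rfl
      have hmap : (seen.map (fun m => convert_into_base m b)) ++ [convert_into_base n b]
          = (seen ++ [n]).map (fun m => convert_into_base m b) := by simp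
      rw [hadd]
      simp only [hcur, hmap]
      exact ih (seen ++ [n]) _ (pvInv_step hb31 hn)
        (by intro m hm
            rcases List.mem_append.mp hm with h1 | h1
            · exact hseen m h1
            · simp at h1; subst h1; exact hn)

-- ===== the orbit of the squared-digit-sum map and its generic cycle facts =====

def pvX (b n0 : Int) (k : Nat) : Int := (fun m => fB m b)^[k] n0

def pvK : Int := 70 * (2 ^ 31 - 1) ^ 2 + 2 ^ 31

theorem pvX_succ (b n0 : Int) (k : Nat) : pvX b n0 (k + 1) = fB (pvX b n0 k) b := by
  simp [pvX, Function.iterate_succ_apply']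

theorem pvX_add (b n0 : Int) (d a : Nat) :
    pvX b n0 (d + a) = (fun m => fB m b)^[d] (pvX b n0 a) := by
  simp [pvX, Function.iterate_add_apply]

theorem fB_rng {b m : Int} (hb : 2 ≤ b) (hb31 : b ≤ 2 ^ 31) (h : 0 ≤ m ∧ m ≤ pvK) :
    0 ≤ fB m b ∧ fB m b ≤ pvK := by
  refine ⟨digitSqSum_nonneg _ _ _ _ (le_refl 0), ?_⟩
  have hlt : m < 2 ^ 70 := by
    have : pvK < 2 ^ 70 := by norm_num [pvK]
    omega
  have hbd := digitSqSum_bound pvFuel 70 m b 0 hb h.1 hlt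
  have h1 : (b - 1) ^ 2 ≤ (2 ^ 31 - 1) ^ 2 := by nlinarith
  rw [fB]
  push_cast at hbd
  have : (70:Int) * (b - 1) ^ 2 ≤ 70 * (2 ^ 31 - 1) ^ 2 := by nlinarith
  simp only [pvK]
  have h231 : (0:Int) ≤ 2 ^ 31 := by norm_num
  linarith

theorem pvX_rng {b n0 : Int} (hb : 2 ≤ b) (hb31 : b ≤ 2 ^ 31) (h0 : 0 ≤ n0 ∧ n0 ≤ pvK) :
    ∀ k, 0 ≤ pvX b n0 k ∧ pvX b n0 k ≤ pvK := by
  intro k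
  induction k with
  | zero => exact h0
  | succ j ih => rw [pvX_succ]; exact fB_rng hb hb31 ih

theorem fB_one {b : Int} (hb : 2 ≤ b) : fB 1 b = 1 := by
  have hF : pvFuel = (pvFuel - 1) + 1 := by norm_num [pvFuel]
  have hb0 : (0:Int) < b := by omega
  rw [fB, hF]
  simp only [digitSqSum, if_pos (show (0:Int) < 1 by norm_num)]
  rw [PySem.Int.floordiv_eq_ediv_of_pos hb0, PySem.Int.mod_eq_emod_of_pos hb0,
    Int.ediv_eq_zero_of_lt (by norm_num) (by omega),
    Int.emod_eq_of_lt (by norm_num) (by omega),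
    digitSqSum_nonpos _ _ _ _ (le_refl 0)]
  norm_num

-- once the orbit hits 1 it stays at 1 (1 is a fixed point for base ≥ 2)
theorem pvX_stays_one {b n0 : Int} (hb : 2 ≤ b) {k : Nat} (hk : pvX b n0 k = 1) :
    ∀ m, k ≤ m → pvX b n0 m = 1 := by
  intro m hm
  obtain ⟨d, rfl⟩ := Nat.exists_eq_add_of_le hm
  induction d with
  | zero => exact hk
  | succ e ih =>
    have : k + (e + 1) = (k + e) + 1 := by omega
    rw [this, pvX_succ, ih (by omega), fB_one hb]

-- periodicity propagates forward from the first repeat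
theorem pvX_shift {b n0 : Int} {j p : Nat} (hper : pvX b n0 (j + p) = pvX b n0 j) :
    ∀ m, j ≤ m → pvX b n0 (m + p) = pvX b n0 m := by
  intro m hm
  obtain ⟨d, rfl⟩ := Nat.exists_eq_add_of_le hm
  have e1 : j + d + p = d + (j + p) := by omega
  have e2 : j + d = d + j := by omega
  rw [e1, pvX_add, hper, e2, pvX_add]

theorem pvX_mul {b n0 : Int} {j p : Nat} (hper : pvX b n0 (j + p) = pvX b n0 j) :
    ∀ (t m : Nat), j ≤ m → pvX b n0 (m + t * p) = pvX b n0 m := by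
  intro t
  induction t with
  | zero => intro m _; simp
  | succ u ih =>
    intro m hm
    have e : m + (u + 1) * p = (m + u * p) + p := by ring
    rw [e, pvX_shift hper (m + u * p) (by omega), ih m hm]

-- pigeonhole: a nodup list of ints in [0, pvK] has at most pvK + 1 elements
theorem pv_nodup_len (l : List Int) (h : l.Nodup) (hr : ∀ m ∈ l, 0 ≤ m ∧ m ≤ pvK) :
    (l.length : Int) ≤ pvK + 1 := by
  have hsub : l.toFinset ⊆ Finset.Icc (0:Int) pvK := by
    intro m hm
    rw [List.mem_toFinset] at hm
    rw [Finset.mem_Icc]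
    exact hr m hm
  have hcard := Finset.card_le_card hsub
  rw [List.toFinset_card_of_nodup h, Int.card_Icc] at hcard
  have hK : (0:Int) ≤ pvK + 1 := by norm_num [pvK]
  calc (l.length : Int) ≤ ((pvK + 1 - 0).toNat : Int) := by exact_mod_cast hcard
    _ = pvK + 1 := by rw [Int.toNat_of_nonneg (by omega)]; ring

-- A's loop (int form) returns a value of the orbit lying on a cycle
theorem seenLoop_spec {b n0 : Int} (hb : 2 ≤ b) (hb31 : b ≤ 2 ^ 31)
    (h0 : 0 ≤ n0 ∧ n0 ≤ pvK) :
    ∀ (fuel i : Nat), pvK + 2 ≤ (i : Int) + (fuel : Int) →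
    ((List.range i).map (pvX b n0)).Nodup →
    ∃ j p : Nat, 1 ≤ p ∧ pvSeenLoop fuel b ((List.range i).map (pvX b n0)) (pvX b n0 i) = pvX b n0 j
      ∧ pvX b n0 (j + p) = pvX b n0 j := by
  intro fuel
  induction fuel with
  | zero =>
    intro i hle hnd
    exfalso
    have := pv_nodup_len _ hnd (by
      intro m hm
      obtain ⟨k, _, rfl⟩ := List.mem_map.mp hm
      exact pvX_rng hb hb31 h0 k)
    simp only [List.length_map, List.length_range] at this
    push_cast at hle
    omega
  | succ f ih =>
    intro i hle hnd
    by_cases hmem : pvX b n0 i ∈ (List.range i).map (pvX b n0)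
    · obtain ⟨j, hj, hx⟩ := List.mem_map.mp hmem
      rw [List.mem_range] at hj
      refine ⟨j, i - j, by omega, ?_, ?_⟩
      · simp only [pvSeenLoop, if_pos hmem]
        exact hx.symm
      · have : j + (i - j) = i := by omega
        rw [this, hx]
    · simp only [pvSeenLoop, if_neg hmem]
      have hadd : PySem.Set.add ((List.range i).map (pvX b n0)) (pvX b n0 i)
          = (List.range (i + 1)).map (pvX b n0) := by
        have hc : PySem.Set.contains ((List.range i).map (pvX b n0)) (pvX b n0 i) = false := by
          simp only [PySem.Set.contains, List.contains_eq_mem, decide_eq_false_iff_not]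
          exact hmem
        rw [PySem.Set.add, hc]
        simp [List.range_succ]
      have hnd' : ((List.range (i + 1)).map (pvX b n0)).Nodup := by
        rw [List.range_succ, List.map_append, List.nodup_append]
        refine ⟨hnd, by rw [List.map_cons, List.map_nil]; exact List.nodup_singleton _, ?_⟩
        intro a ha c hc
        rw [List.map_cons, List.map_nil, List.mem_singleton] at hc
        subst hc
        exact fun h => hmem (h ▸ ha)
      rw [hadd, ← pvX_succ]
      exact ih (i + 1) (by push_cast at hle ⊢; omega) hnd'

-- Floyd's loop: given a meeting point exists within fuel, the returned value
-- is an orbit value equal to its own double index, hence on a cycle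
theorem floyd_spec (b n0 : Int) : ∀ (fuel i : Nat),
    (∃ d, d < fuel ∧ pvX b n0 (i + d + 1) = pvX b n0 (2 * (i + d) + 2)) →
    ∃ j : Nat, floydLoop fuel b (pvX b n0 (i + 1)) (pvX b n0 (2 * i + 2)) = pvX b n0 (j + 1)
      ∧ pvX b n0 (2 * j + 2) = pvX b n0 (j + 1) := by
  intro fuel
  induction fuel with
  | zero =>
    intro i ⟨d, hd, _⟩
    omega
  | succ f ih =>
    intro i ⟨d, hd, hmeet⟩
    by_cases h : pvX b n0 (i + 1) = pvX b n0 (2 * i + 2)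
    · exact ⟨i, by simp only [floydLoop, if_pos h], h.symm⟩
    · simp only [floydLoop, if_neg h]
      have hd0 : d ≠ 0 := by
        rintro rfl
        simp only [Nat.add_zero] at hmeet
        exact h hmeet
      have e1 : fB (pvX b n0 (i + 1)) b = pvX b n0 ((i + 1) + 1) := (pvX_succ b n0 (i + 1)).symm
      have e2 : fB (fB (pvX b n0 (2 * i + 2)) b) b = pvX b n0 (2 * (i + 1) + 2) := by
        have e2' : 2 * (i + 1) + 2 = (2 * i + 2) + 1 + 1 := by omega
        rw [e2', pvX_succ b n0 (2 * i + 2 + 1), pvX_succ b n0 (2 * i + 2)]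
      rw [e1, e2]
      obtain ⟨j, hj1, hj2⟩ := ih (i + 1) ⟨d - 1, by omega, by
        have : i + 1 + (d - 1) = i + d := by omega
        rw [this]; exact hmeet⟩
      exact ⟨j, hj1, hj2⟩

-- a Floyd meeting point exists within pvK + 2 steps
theorem pv_exists_meet {b n0 : Int} (hb : 2 ≤ b) (hb31 : b ≤ 2 ^ 31)
    (h0 : 0 ≤ n0 ∧ n0 ≤ pvK) :
    ∃ d : Nat, (d : Int) ≤ pvK + 1 ∧ pvX b n0 (d + 1) = pvX b n0 (2 * d + 2) := by
  -- pigeonhole over the range of the orbit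
  have hKnonneg : (0:Int) ≤ pvK := by norm_num [pvK]
  obtain ⟨a, ha, a', ha', hne, heq⟩ :=
    Finset.exists_ne_map_eq_of_card_lt_of_maps_to
      (s := Finset.range ((pvK + 1).toNat + 1)) (t := Finset.Icc (0:Int) pvK)
      (f := pvX b n0)
      (by
        rw [Finset.card_range, Int.card_Icc]
        omega)
      (by
        intro k _
        simp only [Finset.coe_Icc, Set.mem_Icc]
        exact pvX_rng hb hb31 h0 k)
  rw [Finset.mem_range] at ha ha'
  -- normalise to j < i with pvX i = pvX j
  obtain ⟨j, i, hji, hij, hxij⟩ : ∃ j i : Nat, j < i ∧ i < (pvK + 1).toNat + 1 ∧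
      pvX b n0 i = pvX b n0 j := by
    rcases Nat.lt_or_ge a a' with hlt | hge
    · exact ⟨a, a', hlt, ha', heq.symm⟩
    · exact ⟨a', a, by omega, ha, heq⟩
  set p : Nat := i - j with hp
  have hp1 : 1 ≤ p := by omega
  have hper : pvX b n0 (j + p) = pvX b n0 j := by
    have : j + p = i := by omega
    rw [this, hxij]
  -- m: the least multiple of p beyond j
  obtain ⟨m, t, hmt, hmj, hmle⟩ : ∃ m t : Nat, m = t * p ∧ j < m ∧ m ≤ j + p := by
    obtain ⟨q, r, hqr, hrlt⟩ : ∃ q r : Nat, p * q + r = j ∧ r < p :=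
      ⟨j / p, j % p, Nat.div_add_mod j p, Nat.mod_lt _ (by omega)⟩
    exact ⟨p * q + p, q + 1, by ring, by omega, by omega⟩
  refine ⟨m - 1, ?_, ?_⟩
  · have hmi : m - 1 ≤ i := by omega
    have hi : (i : Int) ≤ pvK + 1 := by
      have h4 : (i : Int) < ((pvK + 1).toNat : Int) + 1 := by exact_mod_cast hij
      rw [Int.toNat_of_nonneg (by omega)] at h4
      omega
    have h5 : ((m - 1 : Nat) : Int) ≤ (i : Int) := by exact_mod_cast hmi
    omega
  · have e1 : m - 1 + 1 = m := by omega
    have e2 : 2 * (m - 1) + 2 = m + t * p := by omega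
    rw [e1, e2]
    exact (pvX_mul hper t m (by omega)).symm

-- a cyclic orbit value equals 1 exactly when the orbit reaches 1
theorem pv_result_iff {b n0 v : Int} (hb : 2 ≤ b)
    (hv : ∃ j p : Nat, 1 ≤ p ∧ v = pvX b n0 j ∧ pvX b n0 (j + p) = pvX b n0 j) :
    (v = 1 ↔ ∃ k, pvX b n0 k = 1) := by
  obtain ⟨j, p, hp, hvj, hper⟩ := hv
  constructor
  · intro h1
    exact ⟨j, by rw [← hvj, h1]⟩
  · rintro ⟨k, hk⟩
    have := pvX_mul hper k j (le_refl j)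
    rw [hvj, ← this]
    exact pvX_stays_one hb hk (j + k * p) (by nlinarith)

-- both loops return false on the degenerate case number ≤ 0 with base < 2
theorem happyA_empty (b : Int) : happyLoopA pvFuel b [] [] = [] := by
  have hF : pvFuel = (pvFuel - 2) + 1 + 1 := by norm_num [pvFuel]
  rw [hF]
  simp only [happyLoopA, List.not_mem_nil, if_neg (fun h => h)]
  have hsq : square_sum [] = 0 := rfl
  have hconv : convert_into_base (square_sum []) b = [] := by
    rw [hsq, convert_into_base, convertLoop_nonpos _ _ _ _ (le_refl 0)]
  rw [hconv]
  simp

theorem floyd_zero (b : Int) : floydLoop pvFuel b 0 0 = 0 := by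
  have hF : pvFuel = (pvFuel - 1) + 1 := by norm_num [pvFuel]
  rw [hF]
  simp [floydLoop]

-- ===== VERDICT (by name: the statement is the Claim_ definition above) =====
theorem is_b_happy_spec : Claim_equal_is_b_happy := by
  intro number base hdom hpre
  unfold Dom_is_b_happy pvDomInt at hdom
  simp only [Bool.and_eq_true, decide_eq_true_eq] at hdom
  unfold Spec_is_b_happy is_b_happy is_b_happy_alt
  by_cases hb : 2 ≤ base
  · -- main case: base ≥ 2; run both loops against the orbit pvX base n0
    set n0 : Int := if 0 < number then number else 0 with hn0
    have hconv : convert_into_base number base = convert_into_base n0 base := by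
      by_cases h : 0 < number
      · simp [hn0, h]
      · simp only [hn0, if_neg h]
        rw [convert_into_base, convert_into_base,
          convertLoop_nonpos _ _ _ _ (by omega), convertLoop_nonpos _ _ _ _ (le_refl 0)]
    have hb31 : base ≤ 2 ^ 31 := by omega
    have h0 : 0 ≤ n0 ∧ n0 ≤ pvK := by
      constructor
      · rw [hn0]; split <;> omega
      · have : pvK ≥ 2 ^ 31 := by norm_num [pvK]
        rw [hn0]; split <;> omega
    have hinv : pvInv base n0 := by
      refine ⟨h0.1, ?_, Or.inl hb⟩
      have : pvK < 2 ^ 70 := by norm_num [pvK]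
      omega
    -- A-side: reduce to the int seen-loop, then to orbit properties
    have hA := lockstep base hb31 pvFuel [] n0 hinv (by intro m hm; simp at hm)
    have hAstart : ([] : List (List Int)) = ([] : List Int).map (fun m => convert_into_base m base) := by simp
    have hA' : decide (happyLoopA pvFuel base [] (convert_into_base n0 base) = [1])
        = decide (pvSeenLoop pvFuel base [] n0 = 1) := by
      rw [hAstart]; exact hA
    have hx0 : pvX base n0 0 = n0 := rfl
    have hseeneq : ((List.range 0).map (pvX base n0)) = ([] : List Int) := by simp
    obtain ⟨jA, pA, hpA, hvA, hcycA⟩ := seenLoop_spec hb hb31 h0 pvFuel 0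
      (by push_cast; norm_num [pvK, pvFuel]) (by simp)
    rw [hseeneq, hx0] at hvA
    have hiffA : (pvSeenLoop pvFuel base [] n0 = 1 ↔ ∃ k, pvX base n0 k = 1) :=
      pv_result_iff hb ⟨jA, pA, hpA, hvA, hcycA⟩
    -- B-side: Floyd; first align the starting values with the orbit
    have hfB0 : fB number base = pvX base n0 1 := by
      rw [pvX_succ, hx0]
      by_cases h : 0 < number
      · rw [hn0, if_pos h]
      · rw [hn0, if_neg h, fB, fB, digitSqSum_nonpos _ _ _ _ (by omega),
          digitSqSum_nonpos _ _ _ _ (le_refl 0)]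
    have hfB1 : fB (fB number base) base = pvX base n0 2 := by
      rw [hfB0, ← pvX_succ]
    obtain ⟨dm, hdm, hmeet⟩ := pv_exists_meet hb hb31 h0
    have hdmlt : dm < pvFuel := by
      have : (pvFuel : Int) = 2 ^ 70 := by norm_num [pvFuel]
      have h2 : pvK + 1 < (pvFuel : Int) := by rw [this]; norm_num [pvK]
      have : (dm : Int) < (pvFuel : Int) := by omega
      exact_mod_cast this
    obtain ⟨jB, hvB, hcycB⟩ := floyd_spec base n0 pvFuel 0
      ⟨dm, hdmlt, by simpa using hmeet⟩
    have hB' : floydLoop pvFuel base (fB number base) (fB (fB number base) base)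
        = pvX base n0 (jB + 1) := by
      rw [hfB1, hfB0]
      simpa using hvB
    have hiffB : (floydLoop pvFuel base (fB number base) (fB (fB number base) base) = 1
        ↔ ∃ k, pvX base n0 k = 1) := by
      rw [hB']
      exact pv_result_iff hb ⟨jB + 1, jB + 1, by omega, rfl, by
        have : jB + 1 + (jB + 1) = 2 * jB + 2 := by omega
        rw [this, hcycB]⟩
    rw [hconv, hA']
    exact decide_eq_decide.mpr (hiffA.trans hiffB.symm)
  · -- degenerate case: Pre_ forces number ≤ 0; both sides compute false
    have hnum : number ≤ 0 := hpre.resolve_left hb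
    have hconv : convert_into_base number base = [] := by
      rw [convert_into_base, convertLoop_nonpos _ _ _ _ hnum]
    have hf : fB number base = 0 := by
      rw [fB, digitSqSum_nonpos _ _ _ _ hnum]
    have hf0 : fB 0 base = 0 := by
      rw [fB, digitSqSum_nonpos _ _ _ _ (le_refl 0)]
    rw [hconv, happyA_empty, hf, hf0, floyd_zero]
    decide
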